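-- pv_equiv track=rewrite | github.com/chameleonTK/alphabetized-th | Notebooks/util.py | remove_repetitive
-- ===== SOURCE A (Python) =====
-- from itertools import groupby
--
-- numbers = "1234567890"
--
-- def remove_repetitive(sent):
--     ch = []
--     for k, g in groupby(sent):
--         g = list(g)
--         if len(g) >= 3:
--             if k in numbers:
--                 ch += g
--             else:
--                 ch += [k]
--         else:
--             ch += g
--     return ch
-- ===== SOURCE B (Python) =====
-- numbers = "1234567890"
--
-- def remove_repetitive(sent):
--     # single pass over indices with lookback/lookahead instead of grouping runs
--     n = len(sent)
--     out = []
--     for i, c in enumerate(sent):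
--         rep = (c not in numbers and i >= 1 and sent[i-1] == c
--                and ((i >= 2 and sent[i-2] == c) or (i + 1 < n and sent[i+1] == c)))
--         if not rep:
--             out.append(c)
--     return out
-- ===== Notes on version B (the rewrite author's own statement) =====
-- stated objective: alternative
-- what changed: A groups the string into runs with itertools.groupby and decides per run; B makes one index-based pass, keeping each character unless a lookback/lookahead test shows it is a repeated non-digit inside a run of length >= 3.
import Mathlib
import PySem

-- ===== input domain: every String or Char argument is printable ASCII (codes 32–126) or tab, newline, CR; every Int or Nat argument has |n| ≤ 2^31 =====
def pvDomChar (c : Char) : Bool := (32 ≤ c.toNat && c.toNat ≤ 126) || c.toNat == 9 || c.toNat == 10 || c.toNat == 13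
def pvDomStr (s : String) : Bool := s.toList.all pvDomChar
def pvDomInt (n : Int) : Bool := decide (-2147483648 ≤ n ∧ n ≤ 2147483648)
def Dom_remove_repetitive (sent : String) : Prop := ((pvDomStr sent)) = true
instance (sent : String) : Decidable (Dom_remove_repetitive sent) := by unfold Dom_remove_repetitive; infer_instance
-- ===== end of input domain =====

-- B replaces A's groupby-over-runs pass by a single index pass with a lookback/lookahead repetition test (alternative decomposition, same cost).

-- the module constant `numbers = "1234567890"` (membership is on its characters)
def pvNumbers : List Char := "1234567890".toList

-- ===== PORT A =====
-- itertools.groupby over a string: consecutive runs as (key, group) pairs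
def pvGroupby (l : List Char) : List (Char × List Char) :=
  match l with
  | [] => []
  | a :: t => (a, a :: t.takeWhile (· == a)) :: pvGroupby (t.dropWhile (· == a))
termination_by l.length
decreasing_by
  simpa using Nat.lt_succ_of_le (List.length_dropWhile_le (· == a) t)

def remove_repetitive (sent : String) : List String :=
  (pvGroupby sent.toList).foldl
    (fun ch kg =>
      if kg.2.length ≥ 3 then
        if kg.1 ∈ pvNumbers then ch ++ kg.2.map (fun c => String.ofList [c])
        else ch ++ [String.ofList [kg.1]]
      else ch ++ kg.2.map (fun c => String.ofList [c]))
    []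

-- ===== PORT B =====
-- the `rep` test of Source B: repeated non-digit inside a run of length ≥ 3
def pvRep (s : List Char) (n : Int) (i : Int) (c : Char) : Bool :=
  decide (c ∉ pvNumbers ∧ 1 ≤ i ∧ PySem.List.pyGetD s (i-1) ' ' = c ∧
    ((2 ≤ i ∧ PySem.List.pyGetD s (i-2) ' ' = c) ∨
     (i + 1 < n ∧ PySem.List.pyGetD s (i+1) ' ' = c)))

def remove_repetitive_alt (sent : String) : List String :=
  let s := sent.toList
  let n : Int := s.length
  (PySem.List.enumerate s 0).foldl
    (fun out ic => if ¬ pvRep s n ic.1 ic.2 = true then out ++ [String.ofList [ic.2]] else out)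
    []

-- ===== PRECONDITION & SPEC =====
def Spec_remove_repetitive (sent : String) (out : List String) : Prop := out = remove_repetitive_alt sent
instance (sent : String) (out : List String) : Decidable (Spec_remove_repetitive sent out) := by unfold Spec_remove_repetitive; infer_instance

-- ===== CLAIM (what is proved, stated in full; the proofs are below) =====
def Claim_equal_remove_repetitive : Prop := ∀ (sent : String), Dom_remove_repetitive sent → Spec_remove_repetitive sent (remove_repetitive sent)

-- ===== LEMMAS AND PROOFS =====

-- character-level views of both ports (the String wrapping is factored out)
def pvToS (c : Char) : String := String.ofList [c]

def pvFA (p : Char × List Char) : List Char :=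
  if p.2.length ≥ 3 then (if p.1 ∈ pvNumbers then p.2 else [p.1]) else p.2

def pvCoreA (s : List Char) : List Char := (pvGroupby s).flatMap pvFA

-- Source B's `rep` test with a Nat index
abbrev pvRepN (s : List Char) (k : Nat) (c : Char) : Prop :=
  c ∉ pvNumbers ∧ 1 ≤ k ∧ s.getD (k-1) ' ' = c ∧
    ((2 ≤ k ∧ s.getD (k-2) ' ' = c) ∨ (k + 1 < s.length ∧ s.getD (k+1) ' ' = c))

def pvKeepN (s : List Char) (p : Char × Nat) : Bool := ! decide (pvRepN s p.2 p.1)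

def pvCoreB (s : List Char) : List Char := ((s.zipIdx 0).filter (pvKeepN s)).map (·.1)

theorem pv_rep_natCast (s : List Char) (k : Nat) (c : Char) :
    pvRep s (s.length : Int) (k : Int) c = decide (pvRepN s k c) := by
  unfold pvRep pvRepN
  rw [decide_eq_decide]
  constructor
  · rintro ⟨hnum, hi, hprev, hdis⟩
    have hk1 : 1 ≤ k := by exact_mod_cast hi
    have e1 : (k : Int) - 1 = ((k - 1 : Nat) : Int) := by omega
    rw [e1, PySem.List.pyGetD_natCast] at hprev
    refine ⟨hnum, hk1, hprev, ?_⟩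
    rcases hdis with ⟨h2, hg⟩ | ⟨hlt, hg⟩
    · have hk2 : 2 ≤ k := by exact_mod_cast h2
      have e2 : (k : Int) - 2 = ((k - 2 : Nat) : Int) := by omega
      rw [e2, PySem.List.pyGetD_natCast] at hg
      exact Or.inl ⟨hk2, hg⟩
    · have e3 : (k : Int) + 1 = ((k + 1 : Nat) : Int) := by omega
      rw [e3, PySem.List.pyGetD_natCast] at hg
      exact Or.inr ⟨by exact_mod_cast hlt, hg⟩
  · rintro ⟨hnum, hk1, hprev, hdis⟩
    have e1 : (k : Int) - 1 = ((k - 1 : Nat) : Int) := by omega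
    refine ⟨hnum, by exact_mod_cast hk1, by rw [e1, PySem.List.pyGetD_natCast]; exact hprev, ?_⟩
    rcases hdis with ⟨h2, hg⟩ | ⟨hlt, hg⟩
    · have e2 : (k : Int) - 2 = ((k - 2 : Nat) : Int) := by omega
      exact Or.inl ⟨by exact_mod_cast h2, by rw [e2, PySem.List.pyGetD_natCast]; exact hg⟩
    · have e3 : (k : Int) + 1 = ((k + 1 : Nat) : Int) := by omega
      exact Or.inr ⟨by exact_mod_cast hlt, by rw [e3, PySem.List.pyGetD_natCast]; exact hg⟩

theorem pv_foldlA (gs : List (Char × List Char)) (acc : List String) :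
    gs.foldl
      (fun ch kg =>
        if kg.2.length ≥ 3 then
          if kg.1 ∈ pvNumbers then ch ++ kg.2.map (fun c => String.ofList [c])
          else ch ++ [String.ofList [kg.1]]
        else ch ++ kg.2.map (fun c => String.ofList [c]))
      acc
    = acc ++ (gs.flatMap pvFA).map pvToS := by
  induction gs generalizing acc with
  | nil => simp
  | cons p t ih =>
    rw [List.foldl_cons, ih, List.flatMap_cons, List.map_append, ← List.append_assoc]
    congr 1
    unfold pvFA
    split_ifs <;> simp [pvToS]

theorem pv_A_eq (sent : String) :
    remove_repetitive sent = (pvCoreA sent.toList).map pvToS := by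
  unfold remove_repetitive pvCoreA
  rw [pv_foldlA]
  simp

theorem pv_foldlB (t full : List Char) (j : Nat) (acc : List String) :
    (PySem.List.enumerate t (j : Int)).foldl
      (fun out ic => if ¬ pvRep full (full.length : Int) ic.1 ic.2 = true
                     then out ++ [String.ofList [ic.2]] else out)
      acc
    = acc ++ ((t.zipIdx j).filter (pvKeepN full)).map (fun p => pvToS p.1) := by
  induction t generalizing j acc with
  | nil => simp [PySem.List.enumerate_nil]
  | cons c t ih =>
    have hcast : (j : Int) + 1 = ((j + 1 : Nat) : Int) := by push_cast; ring
    rw [PySem.List.enumerate_cons, List.foldl_cons, hcast, ih, List.zipIdx_cons,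
      List.filter_cons]
    have hcond : (¬ pvRep full (full.length : Int) ((j : Nat) : Int) c = true)
        ↔ pvKeepN full (c, j) = true := by
      rw [pv_rep_natCast]
      show ¬ decide (pvRepN full j c) = true ↔ (! decide (pvRepN full j c)) = true
      cases hdec : decide (pvRepN full j c) <;> simp_all
    by_cases h2 : pvKeepN full (c, j) = true
    · rw [if_pos (hcond.mpr h2), if_pos h2]
      simp [pvToS]
    · rw [if_neg (fun hx => h2 (hcond.mp hx)), if_neg h2]

theorem pv_B_eq (sent : String) :
    remove_repetitive_alt sent = (pvCoreB sent.toList).map pvToS := by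
  show (PySem.List.enumerate sent.toList 0).foldl _ [] = _
  rw [show (0 : Int) = ((0 : Nat) : Int) from rfl, pv_foldlB, pvCoreB]
  simp

-- ---- facts about the run decomposition s = replicate m a ++ r ----

theorem pv_run_replicate (a : Char) (t : List Char) :
    a :: t.takeWhile (· == a) = List.replicate ((t.takeWhile (· == a)).length + 1) a := by
  rw [List.eq_replicate_iff]
  refine ⟨by simp, ?_⟩
  intro b hb
  rcases List.mem_cons.mp hb with h | h
  · exact h
  · simpa using List.mem_takeWhile_imp h

theorem pv_getD_run {a : Char} {r : List Char} (m j : Nat) (hj : j < m) :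
    (List.replicate m a ++ r).getD j ' ' = a := by
  rw [List.getD_append _ _ _ j (by simpa using hj), List.getD_replicate _ hj]

theorem pv_getD_rest (a : Char) (r : List Char) (m k : Nat) :
    (List.replicate m a ++ r).getD (m + k) ' ' = r.getD k ' ' := by
  rw [List.getD_append_right _ _ _ _ (by simp)]
  simp

theorem pv_not_rep_zero (s : List Char) (c : Char) : ¬ pvRepN s 0 c := by
  rintro ⟨-, h, -⟩
  omega

theorem pv_rep_in_run (a : Char) (r : List Char) (m k : Nat) (hm : 3 ≤ m)
    (hk1 : 1 ≤ k) (hkm : k < m) (hnum : a ∉ pvNumbers) :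
    pvRepN (List.replicate m a ++ r) k a := by
  refine ⟨hnum, hk1, pv_getD_run m (k - 1) (by omega), ?_⟩
  by_cases h2 : 2 ≤ k
  · exact Or.inl ⟨h2, pv_getD_run m (k - 2) (by omega)⟩
  · have hk : k = 1 := by omega
    subst hk
    refine Or.inr ⟨by simp; omega, pv_getD_run m 2 (by omega)⟩

theorem pv_not_rep_k1_m2 (a : Char) (r : List Char) (hr : ∀ b ∈ r.head?, ¬ b = a) :
    ¬ pvRepN (List.replicate 2 a ++ r) 1 a := by
  rintro ⟨-, -, -, (⟨h2, -⟩ | ⟨hl, hg⟩)⟩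
  · omega
  · cases r with
    | nil => simp at hl
    | cons b rt =>
      have hb : (List.replicate 2 a ++ b :: rt).getD 2 ' ' = b := pv_getD_rest a _ 2 0
      rw [show (1 : Nat) + 1 = 2 + 0 from rfl] at hg
      rw [pv_getD_rest a _ 2 0] at hg
      exact hr b (by simp) hg

theorem pv_map_fst_zipIdx (l : List Char) : ∀ n, ((l.zipIdx n).map (·.1)) = l := by
  induction l with
  | nil => simp
  | cons x t ih => intro n; simp [List.zipIdx_cons, ih]

theorem pv_run_filter (a : Char) (r : List Char) (m : Nat) (hm : 1 ≤ m)
    (hr : ∀ b ∈ r.head?, ¬ b = a) :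
    (((List.replicate m a).zipIdx 0).filter (pvKeepN (List.replicate m a ++ r))).map (·.1)
      = pvFA (a, List.replicate m a) := by
  have hmem : ∀ (p : Char × Nat) (n : Nat), p ∈ (List.replicate m a).zipIdx n →
      p.1 = a ∧ n ≤ p.2 ∧ p.2 < n + m := by
    rintro ⟨c, i⟩ n hp
    obtain ⟨h1, h2, h3⟩ := List.mem_zipIdx hp
    simp at h2
    exact ⟨by simpa using h3, h1, by omega⟩
  by_cases hnum : a ∈ pvNumbers
  · -- digits: the rep test never fires, everything is kept
    rw [List.filter_eq_self.mpr, pv_map_fst_zipIdx]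
    · unfold pvFA; split_ifs <;> rfl
    · intro p hp
      obtain ⟨hc, -, -⟩ := hmem p 0 hp
      simp only [pvKeepN, Bool.not_eq_eq_eq_not, Bool.not_true, decide_eq_false_iff_not]
      rintro ⟨hn, -⟩
      rw [hc] at hn
      exact hn hnum
  · by_cases h3 : 3 ≤ m
    · -- long non-digit run: only index 0 survives
      obtain ⟨m', rfl⟩ : ∃ m', m = m' + 1 := ⟨m - 1, by omega⟩
      simp only [List.replicate_succ, List.cons_append]
      rw [List.zipIdx_cons, List.filter_cons]
      have hkeep0 : pvKeepN (a :: (List.replicate m' a ++ r)) (a, 0) = true := by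
        simp only [pvKeepN, Bool.not_eq_eq_eq_not, Bool.not_true, decide_eq_false_iff_not]
        exact pv_not_rep_zero _ _
      rw [if_pos hkeep0]
      have htail : List.filter (pvKeepN (a :: (List.replicate m' a ++ r)))
          ((List.replicate m' a).zipIdx (0 + 1)) = [] := by
        rw [List.filter_eq_nil_iff]
        rintro ⟨c', i⟩ hp
        obtain ⟨h1, h2, h3'⟩ := List.mem_zipIdx hp
        have hc : c' = a := by simpa using h3'
        simp only [pvKeepN, Bool.not_eq_true, Bool.not_eq_false', decide_eq_true_eq]
        rw [hc]
        exact pv_rep_in_run a r (m' + 1) i h3 h1 (by simp at h2; omega) hnum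
      rw [htail]
      unfold pvFA
      rw [if_pos (by simp; omega), if_neg hnum]
      simp
    · -- short non-digit run (m = 1 or 2): everything is kept
      rw [List.filter_eq_self.mpr, pv_map_fst_zipIdx]
      · unfold pvFA
        rw [if_neg (by simp; omega)]
      · intro p hp
        obtain ⟨hc, hlo, hhi⟩ := hmem p 0 hp
        simp only [pvKeepN, Bool.not_eq_eq_eq_not, Bool.not_true, decide_eq_false_iff_not]
        rw [hc]
        rcases Nat.lt_or_ge p.2 1 with h1 | h1
        · have : p.2 = 0 := by omega
          rw [this]; exact pv_not_rep_zero _ a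
        · have hp2 : p.2 = 1 := by omega
          have hm2 : m = 2 := by omega
          rw [hp2, hm2]
          exact pv_not_rep_k1_m2 a r hr

theorem pv_rep_shift (a : Char) (m : Nat) (hm : 1 ≤ m) (r : List Char)
    (hr : ∀ b ∈ r.head?, ¬ b = a) (k : Nat) (hk : k < r.length) :
    (pvRepN (List.replicate m a ++ r) (m + k) r[k] ↔ pvRepN r k r[k]) := by
  have hlen : (List.replicate m a ++ r).length = m + r.length := by simp
  have hhead : r[0]'(by omega) ≠ a := by
    apply hr
    rw [List.head?_eq_getElem?, List.getElem?_eq_getElem (by omega)]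
    rfl
  match k with
  | 0 =>
    constructor
    · rintro ⟨-, -, hprev, -⟩
      rw [show m + 0 - 1 = m - 1 from rfl, pv_getD_run m (m - 1) (by omega)] at hprev
      exact absurd hprev.symm hhead
    · rintro ⟨-, h, -⟩
      omega
  | 1 =>
    have e0 : (List.replicate m a ++ r).getD (m + 1 - 1) ' ' = r.getD 0 ' ' := by
      rw [show m + 1 - 1 = m + 0 from rfl, pv_getD_rest]
    have e2 : (List.replicate m a ++ r).getD (m + 1 + 1) ' ' = r.getD 2 ' ' := by
      rw [show m + 1 + 1 = m + 2 from rfl, pv_getD_rest]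
    have hr0 : r.getD 0 ' ' = r[0]'(by omega) := by
      rw [List.getD_eq_getElem?_getD, List.getElem?_eq_getElem (by omega)]
      rfl
    constructor
    · rintro ⟨hnum, -, hprev, (⟨-, hg⟩ | ⟨hl, hg⟩)⟩
      · rw [e0] at hprev
        rw [pv_getD_run m (m + 1 - 2) (by omega)] at hg
        rw [← hg] at hprev
        rw [hr0] at hprev
        exact absurd hprev hhead
      · rw [e0] at hprev
        rw [e2] at hg
        exact ⟨hnum, le_refl 1, hprev, Or.inr ⟨by omega, hg⟩⟩
    · rintro ⟨hnum, -, hprev, (⟨h2, -⟩ | ⟨hl, hg⟩)⟩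
      · omega
      · exact ⟨hnum, by omega, by rw [e0]; exact hprev, Or.inr ⟨by omega, by rw [e2]; exact hg⟩⟩
  | k + 2 =>
    have e1 : (List.replicate m a ++ r).getD (m + (k + 2) - 1) ' ' = r.getD (k + 1) ' ' := by
      rw [show m + (k + 2) - 1 = m + (k + 1) from by omega, pv_getD_rest]
    have e2 : (List.replicate m a ++ r).getD (m + (k + 2) - 2) ' ' = r.getD k ' ' := by
      rw [show m + (k + 2) - 2 = m + k from by omega, pv_getD_rest]
    have e3 : (List.replicate m a ++ r).getD (m + (k + 2) + 1) ' ' = r.getD (k + 3) ' ' := by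
      rw [show m + (k + 2) + 1 = m + (k + 3) from by omega, pv_getD_rest]
    constructor
    · rintro ⟨hnum, -, hprev, (⟨-, hg⟩ | ⟨hl, hg⟩)⟩
      · exact ⟨hnum, by omega, by rw [e1] at hprev; exact hprev,
          Or.inl ⟨by omega, by rw [e2] at hg; exact hg⟩⟩
      · exact ⟨hnum, by omega, by rw [e1] at hprev; exact hprev,
          Or.inr ⟨by omega, by rw [e3] at hg; exact hg⟩⟩
    · rintro ⟨hnum, -, hprev, (⟨-, hg⟩ | ⟨hl, hg⟩)⟩
      · exact ⟨hnum, by omega, by rw [e1]; exact hprev, Or.inl ⟨by omega, by rw [e2]; exact hg⟩⟩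
      · exact ⟨hnum, by omega, by rw [e1]; exact hprev,
          Or.inr ⟨by rw [hlen]; omega, by rw [e3]; exact hg⟩⟩

theorem pv_filter_shift (l : List Char) (p q : Char × Nat → Bool) :
    ∀ (d e : Nat), (∀ (k : Nat) (hk : k < l.length), p (l[k], d + k) = q (l[k], e + k)) →
    ((l.zipIdx d).filter p).map (·.1) = ((l.zipIdx e).filter q).map (·.1) := by
  induction l with
  | nil => simp
  | cons x t ih =>
    intro d e h
    have h0 : p (x, d) = q (x, e) := by simpa using h 0 (by simp)
    have hrec := ih (d + 1) (e + 1) (fun k hk => by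
      have hh := h (k + 1) (by simpa using Nat.succ_lt_succ hk)
      simpa [show d + (k + 1) = d + 1 + k from by omega,
        show e + (k + 1) = e + 1 + k from by omega] using hh)
    rw [List.zipIdx_cons, List.zipIdx_cons, List.filter_cons, List.filter_cons, h0]
    by_cases hq : q (x, e) = true
    · simp [hq, hrec]
    · simp [hq, hrec]

theorem pv_core_eq_aux : ∀ (n : Nat) (s : List Char), s.length ≤ n → pvCoreA s = pvCoreB s := by
  intro n
  induction n with
  | zero =>
    intro s hs
    have : s = [] := List.eq_nil_of_length_eq_zero (by omega)
    subst this
    simp [pvCoreA, pvCoreB, pvGroupby]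
  | succ n ih =>
    intro s hs
    match s with
    | [] => simp [pvCoreA, pvCoreB, pvGroupby]
    | a :: t =>
      have hr : ∀ b ∈ (t.dropWhile (· == a)).head?, ¬ b = a := by
        intro b hb
        have h := List.head?_dropWhile_not (· == a) t
        rw [Option.mem_def.mp hb] at h
        simpa using h
      have hsplit : a :: t =
          List.replicate ((t.takeWhile (· == a)).length + 1) a ++ t.dropWhile (· == a) := by
        conv_lhs => rw [show t = t.takeWhile (· == a) ++ t.dropWhile (· == a) from
          (List.takeWhile_append_dropWhile).symm]
        rw [← List.cons_append, pv_run_replicate]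
      have hrlen : (t.dropWhile (· == a)).length ≤ n :=
        le_trans (List.length_dropWhile_le _ _) (by simpa using Nat.le_of_succ_le_succ hs)
      have hA : pvCoreA (a :: t) = pvFA (a, a :: t.takeWhile (· == a))
          ++ pvCoreA (t.dropWhile (· == a)) := by
        unfold pvCoreA
        rw [pvGroupby, List.flatMap_cons]
      have hB : pvCoreB (a :: t) = pvFA (a, a :: t.takeWhile (· == a))
          ++ pvCoreB (t.dropWhile (· == a)) := by
        unfold pvCoreB
        rw [hsplit, List.zipIdx_append, List.filter_append, List.map_append]
        congr 1
        · rw [pv_run_filter a (t.dropWhile (· == a)) ((t.takeWhile (· == a)).length + 1)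
            (by omega) hr, ← pv_run_replicate]
        · rw [show (0 + (List.replicate ((t.takeWhile (· == a)).length + 1) a).length)
            = (t.takeWhile (· == a)).length + 1 from by simp]
          apply pv_filter_shift (t.dropWhile (· == a)) _ _ ((t.takeWhile (· == a)).length + 1) 0
          intro k hk
          simp only [pvKeepN, Nat.zero_add]
          have := pv_rep_shift a ((t.takeWhile (· == a)).length + 1) (by omega)
            (t.dropWhile (· == a)) hr k hk
          rw [show (decide (pvRepN (List.replicate ((t.takeWhile (· == a)).length + 1) a
            ++ t.dropWhile (· == a)) ((t.takeWhile (· == a)).length + 1 + k)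
            ((t.dropWhile (· == a))[k])))
            = (decide (pvRepN (t.dropWhile (· == a)) k ((t.dropWhile (· == a))[k])))
            from decide_eq_decide.mpr this]
      rw [hA, hB, ih (t.dropWhile (· == a)) hrlen]

-- ===== VERDICT (by name: the statement is the Claim_ definition above) =====
theorem remove_repetitive_spec : Claim_equal_remove_repetitive := by
  intro sent _
  unfold Spec_remove_repetitive
  rw [pv_A_eq, pv_B_eq, pv_core_eq_aux sent.toList.length sent.toList le_rfl]
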